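-- pv_equiv track=rewrite | github.com/LemonTea227/PCloud | PCloud Server/pcloud_server.py | naming
-- ===== SOURCE A (Python) =====
-- def naming(name, names):
--     """
--     this function is responsible for generating an available name
--     :param name: the name we want to check if valid
--     :param names: the names we already have
--     :return: an available name
--     """
--     if name not in names:
--         return name
--     else:
--         factors = name.split(".")
--         file_type = "." + factors[-1]
--         name = ".".join(factors[:-1])
--         if "(" not in name:
--             return naming(name + "(1)" + file_type, names)
--         else:
--             parts = name.split("(")
--
--             try:
--                 name = "(".join(parts[:-1])
--                 num = int(parts[-1][:-1])
--                 return naming(name + "(" + str(num + 1) + ")" + file_type, names)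
--             except Exception:
--                 name = "(".join(parts)
--                 return naming(name + "(1)" + file_type, names)
-- ===== SOURCE B (Python) =====
-- def naming(name, names):
--     """Iterative re-implementation: a `while current in taken` loop over a set
--     built once, using str.rpartition instead of split/join list surgery."""
--     taken = set(names)
--     current = name
--     while current in taken:
--         stem, _, last = current.rpartition(".")
--         ext = "." + last
--         prefix, psep, tail = stem.rpartition("(")
--         if not psep:
--             current = stem + "(1)" + ext
--         else:
--             try:
--                 current = prefix + "(" + str(int(tail[:-1]) + 1) + ")" + ext
--             except ValueError:
--                 current = stem + "(1)" + ext
--     return current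
-- ===== Notes on version B (the rewrite author's own statement) =====
-- stated objective: idiomatic
-- what changed: A's tail recursion becomes an iterative `while current in taken:` loop over a set built once from `names`, and the split('.')/join + split('(')/join list surgery is replaced by str.rpartition to locate the extension and the trailing '(n)' counter.
import Mathlib
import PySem

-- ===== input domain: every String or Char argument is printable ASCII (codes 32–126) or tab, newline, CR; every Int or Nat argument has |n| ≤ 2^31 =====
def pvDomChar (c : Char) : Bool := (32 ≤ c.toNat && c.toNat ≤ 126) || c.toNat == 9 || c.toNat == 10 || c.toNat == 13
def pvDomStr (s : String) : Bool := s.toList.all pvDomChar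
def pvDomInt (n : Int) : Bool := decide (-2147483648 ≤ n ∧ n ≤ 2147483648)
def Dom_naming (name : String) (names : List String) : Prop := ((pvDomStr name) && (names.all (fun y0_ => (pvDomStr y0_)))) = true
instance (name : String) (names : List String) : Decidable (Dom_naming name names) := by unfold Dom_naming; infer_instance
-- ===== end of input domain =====

-- B replaces A's split/join list surgery and tail recursion by a `while current in taken:`
-- loop over a set built once, locating the extension and the "(n)" counter with
-- str.rpartition (objective: idiomatic decomposition).

-- ===== PORT A =====
-- A recurses once per colliding candidate; successive candidates are pairwise distinct and each
-- collision lies in `names`, so `names.length + 1` steps of fuel cover the recursion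
-- (the fuel is only a totality guard; it changes no reachable result).
-- `.getD []` / `.getD ""` guard split?/pyGet? where Python cannot fail ("."/"(" are non-empty
-- separators and split always yields a non-empty list); the try/except around int(...) is ported
-- as `num?.isSome` (success test) with `num?.getD 0` reading the parsed value on success.
def namingRec (names : List String) : Nat → String → String
  | 0, current => current
  | fuel + 1, name =>
    if ¬ names.contains name then name
    else
      let factors := (PySem.Str.split? name ".").getD []
      let file_type := "." ++ (PySem.List.pyGet? factors (-1)).getD ""
      let name1 := PySem.Str.join "." (PySem.List.slice factors none (some (-1)))
      if ¬ PySem.Str.isIn "(" name1 then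
        namingRec names fuel (name1 ++ "(1)" ++ file_type)
      else
        let parts := (PySem.Str.split? name1 "(").getD []
        let num? := PySem.Int.ofStr?
            (PySem.Str.slice ((PySem.List.pyGet? parts (-1)).getD "") none (some (-1)))
        if num?.isSome then
          namingRec names fuel
            (PySem.Str.join "(" (PySem.List.slice parts none (some (-1)))
              ++ "(" ++ PySem.Int.toStr (num?.getD 0 + 1) ++ ")" ++ file_type)
        else
          namingRec names fuel (PySem.Str.join "(" parts ++ "(1)" ++ file_type)

def naming (name : String) (names : List String) : String :=
  namingRec names (names.length + 1) name

-- ===== PORT B =====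
-- Hand port of Python's str.rpartition(sep) for a one-character separator sep = c (PySem has no
-- rpartition): returns (before, found, after) where `after` is the part following the LAST
-- occurrence of c and `found` says whether c occurs; Python's not-found result ("", "", s) is
-- rendered as ([], false, s). Exact: the maximal c-free suffix of cs is the reversed
-- takeWhile (· ≠ c) of cs.reverse, and `before` is what precedes it minus the separator itself.
def rpartChars (cs : List Char) (c : Char) : List Char × Bool × List Char :=
  let t := cs.reverse.takeWhile (fun x => x ≠ c)
  if t.length = cs.length then ([], false, cs)
  else ((cs.reverse.drop (t.length + 1)).reverse, true, t.reverse)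

-- one loop body of Source B (string concatenation done on the character lists; the
-- try/except ValueError around int(...) is the match on PySem.Int.ofChars?)
def bumpAlt (current : String) : String :=
  let cs := current.toList
  let p1 := rpartChars cs '.'
  let stem := p1.1
  let ext := '.' :: p1.2.2
  let p2 := rpartChars stem '('
  if !p2.2.1 then String.ofList (stem ++ '(' :: '1' :: ')' :: ext)
  else
    match PySem.Int.ofChars? p2.2.2.dropLast with
    | some num => String.ofList (p2.1 ++ '(' :: (PySem.Int.toChars (num + 1) ++ ')' :: ext))
    | none => String.ofList (stem ++ '(' :: '1' :: ')' :: ext)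

-- while current in taken: current = bump(current)   (same fuel guard as the A-side port)
def namingLoop (taken : PySem.Set String) : Nat → String → String
  | 0, current => current
  | fuel + 1, current =>
    if taken.contains current then namingLoop taken fuel (bumpAlt current) else current

def naming_alt (name : String) (names : List String) : String :=
  namingLoop (PySem.Set.ofList names) (names.length + 1) name

-- ===== PRECONDITION & SPEC =====
def Spec_naming (name : String) (names : List String) (out : String) : Prop := out = naming_alt name names
instance (name : String) (names : List String) (out : String) : Decidable (Spec_naming name names out) := by unfold Spec_naming; infer_instance

-- ===== CLAIM (what is proved, stated in full; the proofs are below) =====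
def Claim_equal_naming : Prop := ∀ (name : String) (names : List String), Dom_naming name names → Spec_naming name names (naming name names)

-- ===== LEMMAS AND PROOFS =====

-- `sC c l` is a structural characterisation of Python's split on the single-character
-- separator c (PySem.Chars.splitOn l [c] computes it with a fuel loop).
def sC (c : Char) : List Char → List (List Char)
  | [] => [[]]
  | x :: xs => if x = c then [] :: sC c xs else (sC c xs).modifyHead (x :: ·)

lemma sC_ne_nil (c : Char) (l : List Char) : sC c l ≠ [] := by
  induction l with
  | nil => simp [sC]
  | cons x xs ih =>
    simp only [sC]
    split_ifs
    · simp
    · cases h : sC c xs with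
      | nil => exact absurd h ih
      | cons a t => simp [List.modifyHead]

lemma modifyHead_append {α : Type} (f : List α → List α) (s u : List (List α)) (h : s ≠ []) :
    (s ++ u).modifyHead f = s.modifyHead f ++ u := by
  cases s with
  | nil => exact absurd rfl h
  | cons a t => simp [List.modifyHead]

lemma go_spec (c : Char) (fuel : Nat) : ∀ (l cur : List Char) (acc : List (List Char)),
    l.length < fuel →
    PySem.Chars.splitOn.go [c] fuel l cur acc =
      acc.reverse ++ (sC c l).modifyHead (cur.reverse ++ ·) := by
  induction fuel with
  | zero => intro l cur acc h; omega
  | succ n ih =>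
    intro l cur acc h
    cases l with
    | nil =>
      simp [PySem.Chars.splitOn.go, sC, List.modifyHead]
    | cons x xs =>
      rw [PySem.Chars.splitOn.go]
      by_cases hx : x = c
      · have hpre : List.isPrefixOf [c] (x :: xs) = true := by simp [List.isPrefixOf, hx]
        rw [if_pos hpre]
        simp only [List.length_singleton, List.drop_one, List.tail_cons]
        rw [ih xs [] (cur.reverse :: acc) (by simpa using Nat.lt_of_succ_lt_succ h)]
        have : (sC c xs).modifyHead (List.reverse [] ++ ·) = sC c xs := by
          cases sC c xs <;> simp [List.modifyHead]
        rw [this]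
        simp [sC, hx, List.modifyHead]
      · have hpre : List.isPrefixOf [c] (x :: xs) = false := by
          simp [List.isPrefixOf, Ne.symm hx]
        rw [if_neg (by simp [hpre])]
        rw [ih xs (x :: cur) acc (by simpa using Nat.lt_of_succ_lt_succ h)]
        have h2 : (sC c xs).modifyHead ((x :: cur).reverse ++ ·) =
            ((sC c xs).modifyHead (x :: ·)).modifyHead (cur.reverse ++ ·) := by
          cases sC c xs <;> simp [List.modifyHead]
        rw [h2]
        simp [sC, hx]

lemma splitOn_singleton (c : Char) (l : List Char) :
    PySem.Chars.splitOn l [c] = sC c l := by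
  rw [PySem.Chars.splitOn, go_spec c (l.length + 1) l [] [] (by omega)]
  cases sC c l <;> simp [List.modifyHead]

lemma sC_of_not_mem (c : Char) (l : List Char) (h : c ∉ l) : sC c l = [l] := by
  induction l with
  | nil => rfl
  | cons x xs ih =>
    simp only [List.mem_cons, not_or] at h
    rw [sC, if_neg (fun hh => h.1 hh.symm), ih h.2]
    simp [List.modifyHead]

lemma sC_append (c : Char) (B T : List Char) (hT : c ∉ T) :
    sC c (B ++ c :: T) = sC c B ++ [T] := by
  induction B with
  | nil => simp [sC, sC_of_not_mem c T hT]
  | cons x xs ih =>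
    simp only [List.cons_append, sC, ih]
    split_ifs
    · rfl
    · rw [modifyHead_append _ _ _ (sC_ne_nil c xs)]

lemma join_sC (c : Char) (l : List Char) : PySem.Chars.join [c] (sC c l) = l := by
  induction l with
  | nil => simp [sC, PySem.Chars.join, List.intercalate]
  | cons x xs ih =>
    simp only [sC]
    obtain ⟨h, t, hst⟩ : ∃ h t, sC c xs = h :: t := by
      cases hsc : sC c xs with
      | nil => exact absurd hsc (sC_ne_nil c xs)
      | cons h t => exact ⟨h, t, rfl⟩
    split_ifs with hx
    · subst hx
      rw [hst] at ih ⊢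
      simpa [PySem.Chars.join, List.intercalate] using ih
    · rw [hst] at ih ⊢
      simp only [List.modifyHead]
      cases t with
      | nil => simpa [PySem.Chars.join, List.intercalate] using ih
      | cons b t' =>
        simp only [PySem.Chars.join, List.intercalate] at ih ⊢
        simp_all

-- the right decomposition: if c ∈ l then l = before ++ c :: after with after the maximal
-- c-free suffix, exactly what rpartChars computes
lemma rpart_decomp (c : Char) (l : List Char) (h : c ∈ l) :
    l = (l.reverse.drop ((l.reverse.takeWhile (fun x => x ≠ c)).length + 1)).reverse
        ++ c :: (l.reverse.takeWhile (fun x => x ≠ c)).reverse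
      ∧ c ∉ (l.reverse.takeWhile (fun x => x ≠ c)).reverse := by
  have hsplit := List.takeWhile_append_dropWhile (p := fun x => decide (x ≠ c)) (l := l.reverse)
  have hd : l.reverse.dropWhile (fun x => decide (x ≠ c)) ≠ [] := by
    intro hnil
    rw [hnil, List.append_nil] at hsplit
    have hmem : c ∈ l.reverse.takeWhile (fun x => decide (x ≠ c)) := by
      rw [hsplit]; simpa using h
    have := List.mem_takeWhile_imp hmem
    simp at this
  obtain ⟨y, d', hdd⟩ := List.exists_cons_of_ne_nil hd
  have hy : y = c := by
    have hh := List.head_dropWhile_not (fun x => decide (x ≠ c)) hd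
    simp only [hdd, List.head_cons] at hh
    simpa using hh
  rw [hy] at hdd
  rw [hdd] at hsplit
  set t := l.reverse.takeWhile (fun x => decide (x ≠ c)) with ht
  constructor
  · have hdrop : l.reverse.drop (t.length + 1) = d' := by
      rw [← hsplit]
      have hassoc : t ++ c :: d' = (t ++ [c]) ++ d' := by simp
      have hl : t.length + 1 = (t ++ [c]).length := by simp
      rw [hassoc, hl, List.drop_left]
    rw [hdrop]
    calc l = l.reverse.reverse := (List.reverse_reverse l).symm
      _ = (t ++ c :: d').reverse := by rw [hsplit]
      _ = d'.reverse ++ c :: t.reverse := by simp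
  · intro hc
    have := List.mem_takeWhile_imp (List.mem_reverse.mp hc)
    simp at this

lemma rpartChars_of_not_mem (c : Char) (l : List Char) (h : c ∉ l) :
    rpartChars l c = ([], false, l) := by
  have ht : l.reverse.takeWhile (fun x => decide (x ≠ c)) = l.reverse := by
    rw [List.takeWhile_eq_self_iff]
    intro x hx
    simp only [decide_eq_true_eq]
    intro hxc
    subst hxc
    exact h (List.mem_reverse.mp hx)
  simp only [rpartChars]
  rw [if_pos (by rw [ht, List.length_reverse])]

lemma rpartChars_of_mem (c : Char) (l : List Char) (h : c ∈ l) :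
    rpartChars l c =
      ((l.reverse.drop ((l.reverse.takeWhile (fun x => x ≠ c)).length + 1)).reverse, true,
        (l.reverse.takeWhile (fun x => x ≠ c)).reverse) := by
  obtain ⟨hdec, -⟩ := rpart_decomp c l h
  rw [rpartChars]
  rw [if_neg]
  have hlen := congrArg List.length hdec
  simp only [List.length_append, List.length_cons, List.length_reverse] at hlen
  omega

-- A's loop body, written out with its intermediate values as named functions
-- (definitionally the lets of namingRec's else branch; proof-layer only)
def ftypeA (s : String) : String :=
  "." ++ (PySem.List.pyGet? ((PySem.Str.split? s ".").getD []) (-1)).getD ""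
def name1A (s : String) : String :=
  PySem.Str.join "." (PySem.List.slice ((PySem.Str.split? s ".").getD []) none (some (-1)))
def partsA (s : String) : List String := (PySem.Str.split? (name1A s) "(").getD []
def numA (s : String) : Option Int :=
  PySem.Int.ofStr? (PySem.Str.slice ((PySem.List.pyGet? (partsA s) (-1)).getD "") none (some (-1)))
def stepA (s : String) : String :=
  if ¬ PySem.Str.isIn "(" (name1A s) then name1A s ++ "(1)" ++ ftypeA s
  else if (numA s).isSome then
    PySem.Str.join "(" (PySem.List.slice (partsA s) none (some (-1)))
      ++ "(" ++ PySem.Int.toStr ((numA s).getD 0 + 1) ++ ")" ++ ftypeA s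
  else PySem.Str.join "(" (partsA s) ++ "(1)" ++ ftypeA s

lemma split_getD (u sep : String) (c : Char) (hsep : sep.toList = [c]) :
    (PySem.Str.split? u sep).getD [] = (sC c u.toList).map String.ofList := by
  simp [PySem.Str.split?, PySem.Chars.split?, hsep, splitOn_singleton]

lemma join_ofList (sep : String) (ps : List (List Char)) :
    (PySem.Str.join sep (ps.map String.ofList)).toList = PySem.Chars.join sep.toList ps := by
  rw [PySem.Str.toList_join]
  simp [List.map_map, Function.comp_def, String.toList_ofList]

lemma rpart_split (c : Char) (l : List Char) (h : c ∈ l) :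
    ∃ P T, rpartChars l c = (P, true, T) ∧ l = P ++ c :: T ∧ c ∉ T :=
  ⟨_, _, rpartChars_of_mem c l h, (rpart_decomp c l h).1, (rpart_decomp c l h).2⟩

lemma isIn_paren (u : String) : PySem.Str.isIn "(" u = true ↔ '(' ∈ u.toList := by
  rw [PySem.Str.isIn_iff_infix]
  have h : ("(" : String).toList = ['('] := by decide
  rw [h, List.singleton_infix_iff]

lemma stepA_eq (s : String) : stepA s = bumpAlt s := by
  have hdotT : ("." : String).toList = ['.'] := by decide
  have hparT : ("(" : String).toList = ['('] := by decide
  have h1T : ("(1)" : String).toList = ['(', '1', ')'] := by decide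
  by_cases hdot : '.' ∈ s.toList
  · obtain ⟨P, T, hrp, hdec, hT⟩ := rpart_split '.' s.toList hdot
    have hsC : sC '.' s.toList = sC '.' P ++ [T] := by
      rw [hdec]; exact sC_append '.' P T hT
    have hfac : (PySem.Str.split? s ".").getD []
        = (sC '.' P).map String.ofList ++ [String.ofList T] := by
      rw [split_getD s "." '.' hdotT, hsC, List.map_append]; rfl
    have hft : ftypeA s = "." ++ String.ofList T := by
      rw [ftypeA, hfac, PySem.List.pyGet?_neg_one_append_singleton]; rfl
    have hname1 : name1A s = PySem.Str.join "." ((sC '.' P).map String.ofList) := by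
      rw [name1A, hfac, PySem.List.slice_to_neg_one, List.dropLast_concat]
    have hn1T : (name1A s).toList = P := by
      rw [hname1, join_ofList, hdotT, join_sC]
    by_cases hpar : '(' ∈ P
    · obtain ⟨Q, U, hrpP, hdecP, hU⟩ := rpart_split '(' P hpar
      have hsCP : sC '(' P = sC '(' Q ++ [U] := by
        rw [hdecP]; exact sC_append '(' Q U hU
      have hinT : PySem.Str.isIn "(" (name1A s) = true := (isIn_paren _).mpr (hn1T ▸ hpar)
      have hparts : partsA s = (sC '(' Q).map String.ofList ++ [String.ofList U] := by
        rw [partsA, split_getD _ "(" '(' hparT, hn1T, hsCP, List.map_append]; rfl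
      have hnum : numA s = PySem.Int.ofChars? U.dropLast := by
        rw [numA, hparts, PySem.List.pyGet?_neg_one_append_singleton]
        simp only [Option.getD_some, PySem.Int.ofStr?]
        rw [PySem.Str.slice_to_neg_one, String.toList_ofList]
      rw [stepA, if_neg (not_not_intro hinT), hnum]
      cases hn : PySem.Int.ofChars? U.dropLast with
      | none =>
        rw [if_neg (by simp)]
        have hjoinP : (PySem.Str.join "(" (partsA s)).toList = P := by
          have hmap : List.map String.ofList (sC '(' Q) ++ [String.ofList U]
              = List.map String.ofList (sC '(' P) := by rw [hsCP]; simp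
          rw [hparts, hmap, join_ofList, hparT, join_sC]
        rw [← String.toList_inj]
        simp only [bumpAlt, hrp, hrpP, hn, Bool.not_true, if_neg (by simp : ¬ (false = true))]
        simp [String.toList_append, hjoinP, hft, h1T, hdotT, String.toList_ofList]
      | some num =>
        rw [if_pos (by simp)]
        have hslice : PySem.List.slice (partsA s) none (some (-1))
            = (sC '(' Q).map String.ofList := by
          rw [hparts, PySem.List.slice_to_neg_one, List.dropLast_concat]
        have hjoinQ : (PySem.Str.join "(" ((sC '(' Q).map String.ofList)).toList = Q := by
          rw [join_ofList, hparT, join_sC]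
        rw [← String.toList_inj]
        simp only [bumpAlt, hrp, hrpP, hn, Bool.not_true, if_neg (by simp : ¬ (false = true))]
        simp [String.toList_append, hslice, hjoinQ, hft, hdotT, hparT,
          PySem.Int.toList_toStr, String.toList_ofList]
    · have hrpP : rpartChars P '(' = ([], false, P) := rpartChars_of_not_mem '(' P hpar
      have hinF : PySem.Str.isIn "(" (name1A s) = false := by
        cases hb : PySem.Str.isIn "(" (name1A s)
        · rfl
        · exact absurd (hn1T ▸ (isIn_paren _).mp hb) hpar
      rw [stepA, if_pos (by rw [hinF]; simp)]
      rw [← String.toList_inj]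
      simp only [bumpAlt, hrp, hrpP, Bool.not_false]
      simp [String.toList_append, hn1T, hft, h1T, hdotT, String.toList_ofList]
  · have hrp : rpartChars s.toList '.' = ([], false, s.toList) :=
      rpartChars_of_not_mem '.' s.toList hdot
    have hfac : (PySem.Str.split? s ".").getD [] = [String.ofList s.toList] := by
      rw [split_getD s "." '.' hdotT, sC_of_not_mem '.' s.toList hdot]; rfl
    have hft : ftypeA s = "." ++ String.ofList s.toList := by
      rw [ftypeA, hfac]; simp [PySem.List.pyGet?_neg_one]
    have hname1 : name1A s = PySem.Str.join "." [] := by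
      rw [name1A, hfac, PySem.List.slice_to_neg_one]; rfl
    have hn1T : (name1A s).toList = [] := by
      have : ([] : List String) = ([] : List (List Char)).map String.ofList := rfl
      rw [hname1, this, join_ofList]
      simp [PySem.Chars.join, List.intercalate]
    have hinF : PySem.Str.isIn "(" (name1A s) = false := by
      cases hb : PySem.Str.isIn "(" (name1A s)
      · rfl
      · have := (isIn_paren _).mp hb
        rw [hn1T] at this
        simp at this
    rw [stepA, if_pos (by rw [hinF]; simp)]
    rw [← String.toList_inj]
    have hrpNil : rpartChars [] '(' = ([], false, []) := rfl
    simp only [bumpAlt, hrp, hrpNil, Bool.not_false]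
    simp [String.toList_append, hn1T, hft, h1T, hdotT, String.toList_ofList]

lemma step_eq (s : String) :
    (let factors := (PySem.Str.split? s ".").getD []
     let file_type := "." ++ (PySem.List.pyGet? factors (-1)).getD ""
     let name1 := PySem.Str.join "." (PySem.List.slice factors none (some (-1)))
     if ¬ PySem.Str.isIn "(" name1 then (name1 ++ "(1)" ++ file_type)
     else
       let parts := (PySem.Str.split? name1 "(").getD []
       let num? := PySem.Int.ofStr?
           (PySem.Str.slice ((PySem.List.pyGet? parts (-1)).getD "") none (some (-1)))
       if num?.isSome then
         (PySem.Str.join "(" (PySem.List.slice parts none (some (-1)))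
           ++ "(" ++ PySem.Int.toStr (num?.getD 0 + 1) ++ ")" ++ file_type)
       else (PySem.Str.join "(" parts ++ "(1)" ++ file_type)) = bumpAlt s := by
  have h := stepA_eq s
  unfold stepA ftypeA name1A partsA numA at h
  exact h

lemma contains_ofList (xs : List String) (x : String) :
    (PySem.Set.ofList xs).contains x = xs.contains x := by
  simp [PySem.Set.contains, PySem.Set.mem_ofList]

lemma namingRec_eq_loop (names : List String) (fuel : Nat) : ∀ current : String,
    namingRec names fuel current = namingLoop (PySem.Set.ofList names) fuel current := by
  induction fuel with
  | zero => intro c; rfl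
  | succ n ih =>
    intro c
    rw [namingRec, namingLoop, contains_ofList]
    by_cases h : names.contains c
    · rw [if_pos h, ← ih (bumpAlt c), ← step_eq c]
      simp only [h, not_true, if_false]
      split_ifs <;> rfl
    · rw [if_neg h, if_pos (by simpa using h)]

-- ===== VERDICT (by name: the statement is the Claim_ definition above) =====
theorem naming_spec : Claim_equal_naming := by
  intro name names _
  unfold Spec_naming naming naming_alt
  exact namingRec_eq_loop names (names.length + 1) name
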